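-- pv_equiv track=rewrite | github.com/tilast/hashcode2017 | dp.py | get_endpoint_to_sorted_caches
-- ===== SOURCE A (Python) =====
-- DC_SOURCE = -1
--
-- def get_endpoint_to_sorted_caches(endpoint_source_to_latency):
--     endpoint_to_caches = dict()
--
--     for endpoint, source in endpoint_source_to_latency.keys():
--         if source != DC_SOURCE:
--             endpoint_to_caches.setdefault(endpoint, list()).append(source)
--
--     # sort caches by ascending latency
--     for endpoint, caches in endpoint_to_caches.items():
--         caches.sort(key=lambda c: endpoint_source_to_latency[(endpoint, c)])
--
--     return endpoint_to_caches
-- ===== SOURCE B (Python) =====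
-- DC_SOURCE = -1
--
-- def get_endpoint_to_sorted_caches(endpoint_source_to_latency):
--     # Sort-once-then-partition: register endpoints in first-appearance order,
--     # stable-sort all non-DC entries globally by latency, then distribute.
--     endpoint_to_caches = dict()
--     entries = []
--     for (endpoint, source), latency in endpoint_source_to_latency.items():
--         if source != DC_SOURCE:
--             endpoint_to_caches.setdefault(endpoint, list())
--             entries.append((endpoint, source, latency))
--
--     entries.sort(key=lambda t: t[2])
--
--     for endpoint, source, _ in entries:
--         endpoint_to_caches[endpoint].append(source)
--
--     return endpoint_to_caches
-- ===== Notes on version B (the rewrite author's own statement) =====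
-- stated objective: alternative
-- what changed: A groups non-DC sources per endpoint and then sorts each endpoint's list separately with a dict-lookup key; B registers endpoints, stable-sorts all non-DC entries once globally by latency and distributes them in one pass, so the per-group sorts and the key-lookup disappear.
import Mathlib
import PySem

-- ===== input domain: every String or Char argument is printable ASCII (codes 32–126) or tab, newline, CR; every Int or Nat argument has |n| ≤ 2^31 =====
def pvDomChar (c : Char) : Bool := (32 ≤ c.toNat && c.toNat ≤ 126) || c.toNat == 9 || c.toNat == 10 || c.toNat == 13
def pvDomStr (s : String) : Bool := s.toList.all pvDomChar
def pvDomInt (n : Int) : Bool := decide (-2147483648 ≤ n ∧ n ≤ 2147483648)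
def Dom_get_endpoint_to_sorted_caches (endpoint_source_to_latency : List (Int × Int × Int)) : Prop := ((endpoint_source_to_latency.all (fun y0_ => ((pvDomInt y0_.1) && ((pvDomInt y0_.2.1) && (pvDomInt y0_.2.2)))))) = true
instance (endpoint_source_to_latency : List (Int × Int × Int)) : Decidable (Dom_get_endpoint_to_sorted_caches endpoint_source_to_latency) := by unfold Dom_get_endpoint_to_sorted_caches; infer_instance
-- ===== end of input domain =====

-- B replaces A's group-then-sort-each-group shape by one global stable sort by latency
-- followed by a single distribution pass (objective: alternative decomposition, same cost).
-- The dict argument is a List of ((endpoint, source), latency) triples flattened to (endpoint, source, latency).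

-- ===== PORT A =====
def pvDCSource : Int := -1

-- endpoint_source_to_latency[(endpoint, c)]: first-match dict lookup; wherever A evaluates it
-- the key is present (c came from the same dict), so the default 0 is never used.
def pvLatLookup (l : List (Int × Int × Int)) (e c : Int) : Int :=
  ((l.find? (fun t => t.1 == e && t.2.1 == c)).map (fun t => t.2.2)).getD 0

def get_endpoint_to_sorted_caches (endpoint_source_to_latency : List (Int × Int × Int)) : List (Int × List Int) :=
  -- for endpoint, source in …keys(): if source != DC_SOURCE: setdefault(endpoint, []).append(source)
  let d := endpoint_source_to_latency.foldl
    (fun (d : PySem.Dict Int (List Int)) t =>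
      if t.2.1 ≠ pvDCSource then d.modify t.1 [] (fun cs => cs ++ [t.2.1]) else d)
    PySem.Dict.empty
  -- for endpoint, caches in items(): caches.sort(key=lambda c: endpoint_source_to_latency[(endpoint, c)])
  d.items.map (fun p => (p.1, PySem.List.sorted p.2 (fun c => pvLatLookup endpoint_source_to_latency p.1 c)))

-- ===== PORT B =====
def get_endpoint_to_sorted_caches_alt (endpoint_source_to_latency : List (Int × Int × Int)) : List (Int × List Int) :=
  -- first loop: seed dict keys in first-appearance order, collect the non-DC entries
  let st := endpoint_source_to_latency.foldl
    (fun (st : PySem.Dict Int (List Int) × List (Int × Int × Int)) t =>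
      if t.2.1 ≠ pvDCSource then (st.1.setdefault t.1 [], st.2 ++ [t]) else st)
    (PySem.Dict.empty, [])
  -- entries.sort(key=lambda t: t[2])
  let entries := PySem.List.sorted st.2 (fun t => t.2.2)
  -- for endpoint, source, _ in entries: endpoint_to_caches[endpoint].append(source)
  -- (the key was pre-seeded in the first loop, so d[endpoint] cannot raise; modify with default [] is exact here)
  (entries.foldl (fun (d : PySem.Dict Int (List Int)) t => d.modify t.1 [] (fun cs => cs ++ [t.2.1])) st.1).items

-- ===== PRECONDITION & SPEC =====
-- Pre_ requires the (endpoint, source) key pairs to be pairwise distinct: the Python argument is a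
-- dict keyed by those pairs, so duplicate keys can never reach A (a dict literal with a repeated key
-- collapses before the call); on duplicate-key lists the first-match lookup order is accidental.
def Pre_get_endpoint_to_sorted_caches (endpoint_source_to_latency : List (Int × Int × Int)) : Prop :=
  (endpoint_source_to_latency.map (fun t => (t.1, t.2.1))).Nodup
instance (endpoint_source_to_latency : List (Int × Int × Int)) : Decidable (Pre_get_endpoint_to_sorted_caches endpoint_source_to_latency) := by unfold Pre_get_endpoint_to_sorted_caches; infer_instance

def pvWitness_get_endpoint_to_sorted_caches : (List (Int × Int × Int)) :=
  [(0, 1, 3), (0, 2, 1), (1, -1, 9), (1, 2, 4)]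

def Spec_get_endpoint_to_sorted_caches (endpoint_source_to_latency : List (Int × Int × Int)) (out : List (Int × List Int)) : Prop := out = get_endpoint_to_sorted_caches_alt endpoint_source_to_latency
instance (endpoint_source_to_latency : List (Int × Int × Int)) (out : List (Int × List Int)) : Decidable (Spec_get_endpoint_to_sorted_caches endpoint_source_to_latency out) := by unfold Spec_get_endpoint_to_sorted_caches; infer_instance

-- ===== CLAIM (what is proved, stated in full; the proofs are below) =====
def Claim_equal_get_endpoint_to_sorted_caches : Prop := ∀ (endpoint_source_to_latency : List (Int × Int × Int)), Dom_get_endpoint_to_sorted_caches endpoint_source_to_latency → Pre_get_endpoint_to_sorted_caches endpoint_source_to_latency → Spec_get_endpoint_to_sorted_caches endpoint_source_to_latency (get_endpoint_to_sorted_caches endpoint_source_to_latency)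

-- ===== LEMMAS AND PROOFS =====

-- the non-DC entries, in order
def pvF (l : List (Int × Int × Int)) : List (Int × Int × Int) :=
  l.filter (fun t => decide (t.2.1 ≠ pvDCSource))

-- a fold guarded by `if p a` is a fold over the filtered list
theorem pv_foldl_if_filter {α σ : Type} (p : α → Prop) [DecidablePred p]
    (f : σ → α → σ) (l : List α) (s : σ) :
    l.foldl (fun s a => if p a then f s a else s) s
      = (l.filter (fun a => decide (p a))).foldl f s := by
  induction l generalizing s with
  | nil => rfl
  | cons a l ih =>
    by_cases h : p a <;> simp [h, ih]

-- a pair fold whose components are updated independently splits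
theorem pv_foldl_pair {α σ τ : Type} (p : α → Prop) [DecidablePred p]
    (f : σ → α → σ) (g : τ → α → τ) (l : List α) (a : σ) (b : τ) :
    l.foldl (fun st t => if p t then (f st.1 t, g st.2 t) else st) (a, b)
      = (l.foldl (fun s t => if p t then f s t else s) a,
         l.foldl (fun s t => if p t then g s t else s) b) := by
  induction l generalizing a b with
  | nil => rfl
  | cons x l ih =>
    by_cases h : p x <;> simp [h, ih]

theorem pv_foldl_snoc {α : Type} (l : List α) (s : List α) :
    l.foldl (fun s t => s ++ [t]) s = s ++ l := by
  induction l generalizing s with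
  | nil => simp
  | cons x l ih => simp [ih]

-- keys of a setdefault-seeding fold
theorem pv_keys_foldl_setdefault (l : List (Int × Int × Int)) (d : PySem.Dict Int (List Int)) :
    (l.foldl (fun d t => d.setdefault t.1 ([] : List Int)) d).keys
      = PySem.Set.update d.keys (l.map (fun t => t.1)) := by
  induction l generalizing d with
  | nil => rfl
  | cons t l ih =>
    simp only [List.foldl_cons, List.map_cons, ih, PySem.Set.update, List.foldl_cons]
    congr 1
    rw [PySem.Dict.keys_setdefault]
    by_cases h : d.contains t.1 = true
    · have hm : t.1 ∈ d.keys := (PySem.Dict.contains_iff_mem_keys d t.1).mp h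
      simp [PySem.Set.add, h, hm]
    · have hm : t.1 ∉ d.keys := fun hm => h ((PySem.Dict.contains_iff_mem_keys d t.1).mpr hm)
      simp [PySem.Set.add, h, hm]

-- values of the seeding fold are all []
theorem pv_getD_foldl_setdefault (l : List (Int × Int × Int)) (d : PySem.Dict Int (List Int))
    (h : ∀ e, d.getD e [] = []) (e : Int) :
    (l.foldl (fun d t => d.setdefault t.1 ([] : List Int)) d).getD e [] = [] := by
  induction l generalizing d with
  | nil => exact h e
  | cons t l ih =>
    refine ih _ (fun e' => ?_)
    by_cases he : e' = t.1
    · subst he; rw [PySem.Dict.getD_setdefault_self]; exact h _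
    · rw [PySem.Dict.getD_eq_get?_getD, PySem.Dict.get?_setdefault_of_ne _ _ he,
        ← PySem.Dict.getD_eq_get?_getD]
      exact h e'

theorem pv_nodup_keys_foldl_setdefault (l : List (Int × Int × Int)) (d : PySem.Dict Int (List Int))
    (h : d.keys.Nodup) :
    (l.foldl (fun d t => d.setdefault t.1 ([] : List Int)) d).keys.Nodup := by
  induction l generalizing d with
  | nil => exact h
  | cons t l ih =>
    refine ih _ ?_
    rw [PySem.Dict.keys_setdefault]
    by_cases hc : d.contains t.1 = true
    · simp [hc, h]
    · have hm : t.1 ∉ d.keys := fun hm =>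
        hc ((PySem.Dict.contains_iff_mem_keys d t.1).mpr hm)
      rw [if_neg hc, List.nodup_append]
      refine ⟨h, List.nodup_singleton _, ?_⟩
      intro a ha b hb heq
      exact hm ((heq.trans (List.mem_singleton.mp hb)) ▸ ha)

-- Set.update adds nothing when every element is already present
theorem pv_set_update_subset {α : Type} [BEq α] [LawfulBEq α] (s : PySem.Set α) (xs : List α)
    (h : ∀ x ∈ xs, x ∈ s) : PySem.Set.update s xs = s := by
  induction xs generalizing s with
  | nil => rfl
  | cons x xs ih =>
    have hc : PySem.Set.contains s x = true := by
      simpa using h x (by simp)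
    simp only [PySem.Set.update, List.foldl_cons, PySem.Set.add, hc]
    exact ih s (fun y hy => h y (by simp [hy]))

-- the grouping fold, via getD_foldl_modify_append (triples mapped to pairs)
theorem pv_getD_group_fold (l : List (Int × Int × Int)) (d : PySem.Dict Int (List Int)) (e : Int) :
    (l.foldl (fun (d : PySem.Dict Int (List Int)) t => d.modify t.1 [] (fun cs => cs ++ [t.2.1])) d).getD e []
      = d.getD e [] ++ (l.filter (fun t => t.1 == e)).map (fun t => t.2.1) := by
  have hmap : l.foldl (fun (d : PySem.Dict Int (List Int)) t => d.modify t.1 [] (fun cs => cs ++ [t.2.1])) d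
      = (l.map (fun t => (t.1, t.2.1))).foldl
          (fun (d : PySem.Dict Int (List Int)) p => d.modify p.1 [] (fun cs => cs ++ [p.2])) d := by
    rw [List.foldl_map]
  rw [hmap, PySem.Dict.getD_foldl_modify_append]
  congr 1
  rw [List.filter_map, List.map_map]
  rfl

-- insertBy maps through a function that determines the key
theorem pv_map_insertBy {α β : Type} (g : α → β) (b : β → β → Bool) (x : α) (ys : List α) :
    (PySem.List.insertBy (fun a c => b (g a) (g c)) x ys).map g
      = PySem.List.insertBy b (g x) (ys.map g) := by
  induction ys with
  | nil => rfl
  | cons y ys ih =>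
    by_cases h : b (g x) (g y) <;> simp [PySem.List.insertBy, h, ih]

-- sorted of a mapped list
theorem pv_map_sorted {α β κ : Type} [LinearOrder κ] (g : α → β) (k : β → κ) (xs : List α) :
    PySem.List.sorted (xs.map g) k = (PySem.List.sorted xs (fun a => k (g a))).map g := by
  induction xs using List.reverseRecOn with
  | nil => rfl
  | append_singleton xs x ih =>
    simp only [PySem.List.sorted_eq_foldl_insertBy, List.map_append, List.map_cons,
      List.map_nil, List.foldl_append, List.foldl_cons, List.foldl_nil] at ih ⊢
    rw [ih, ← pv_map_insertBy g (fun a c => decide (k a < k c)) x]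

theorem pv_insertBy_congr {α : Type} (b₁ b₂ : α → α → Bool) (x : α) (ys : List α)
    (h : ∀ y ∈ ys, b₁ x y = b₂ x y) :
    PySem.List.insertBy b₁ x ys = PySem.List.insertBy b₂ x ys := by
  induction ys with
  | nil => rfl
  | cons y ys ih =>
    have hy := h y (by simp)
    by_cases hb : b₁ x y = true
    · simp [PySem.List.insertBy, hb, hy ▸ hb]
    · have hb₂ : b₂ x y = false := by rw [← hy]; simpa using hb
      simp [PySem.List.insertBy, hb, hb₂]
      exact ih (fun z hz => h z (by simp [hz]))

-- sorted only looks at keys of elements of the list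
theorem pv_sorted_congr {α κ : Type} [LinearOrder κ] (xs : List α) (k₁ k₂ : α → κ)
    (h : ∀ a ∈ xs, k₁ a = k₂ a) :
    PySem.List.sorted xs k₁ = PySem.List.sorted xs k₂ := by
  induction xs using List.reverseRecOn with
  | nil => rfl
  | append_singleton xs x ih =>
    simp only [PySem.List.sorted_eq_foldl_insertBy, List.foldl_append, List.foldl_cons,
      List.foldl_nil] at ih ⊢
    rw [ih (fun a ha => h a (by simp [ha]))]
    refine pv_insertBy_congr _ _ x _ (fun y hy => ?_)
    have hyx : y ∈ xs := by
      have : y ∈ PySem.List.sorted xs k₂ := by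
        rwa [PySem.List.sorted_eq_foldl_insertBy]
      exact (PySem.List.mem_sorted xs k₂ false y).mp this
    rw [h x (by simp), h y (by simp [hyx])]

theorem pv_insertBy_cons_pos {α : Type} (b : α → α → Bool) (x y : α) (ys : List α)
    (h : b x y = true) :
    PySem.List.insertBy b x (y :: ys) = x :: y :: ys := by
  simp [PySem.List.insertBy, h]

theorem pv_insertBy_cons_neg {α : Type} (b : α → α → Bool) (x y : α) (ys : List α)
    (h : b x y = false) :
    PySem.List.insertBy b x (y :: ys) = y :: PySem.List.insertBy b x ys := by
  simp [PySem.List.insertBy, h]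

-- filtering commutes with inserting into a key-sorted list
theorem pv_filter_insertBy {α κ : Type} [LinearOrder κ] (key : α → κ) (p : α → Bool) (x : α)
    (ys : List α) (h : ys.Pairwise (fun a b => key a ≤ key b)) :
    (PySem.List.insertBy (fun a b => decide (key a < key b)) x ys).filter p
      = if p x then PySem.List.insertBy (fun a b => decide (key a < key b)) x (ys.filter p)
        else ys.filter p := by
  induction ys with
  | nil =>
    by_cases hp : p x = true <;> simp [PySem.List.insertBy, hp]
  | cons y ys ih =>
    have hpw := (List.pairwise_cons.mp h).1
    have htl := (List.pairwise_cons.mp h).2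
    by_cases hb : key x < key y
    · rw [pv_insertBy_cons_pos _ _ _ _ (by simpa using hb)]
      by_cases hpx : p x = true
      · rw [if_pos hpx, List.filter_cons_of_pos hpx]
        by_cases hpy : p y = true
        · rw [List.filter_cons_of_pos hpy,
            pv_insertBy_cons_pos _ _ _ _ (by simpa using hb)]
        · rw [List.filter_cons_of_neg hpy]
          cases hfz : ys.filter p with
          | nil => rfl
          | cons z zs =>
            have hz : z ∈ ys := List.mem_of_mem_filter (hfz ▸ List.mem_cons_self)
            have hxz : key x < key z := lt_of_lt_of_le hb (hpw z hz)
            rw [pv_insertBy_cons_pos _ _ _ _ (by simpa using hxz)]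
      · rw [if_neg hpx, List.filter_cons_of_neg hpx]
    · have hb' : decide (key x < key y) = false := by simpa using hb
      rw [pv_insertBy_cons_neg _ _ _ _ hb']
      by_cases hpy : p y = true
      · rw [List.filter_cons_of_pos hpy, List.filter_cons_of_pos hpy, ih htl]
        by_cases hpx : p x = true
        · simp only [if_pos hpx]
          rw [pv_insertBy_cons_neg (fun a b => decide (key a < key b)) x y _ hb']
        · simp only [if_neg hpx]
      · rw [List.filter_cons_of_neg hpy, List.filter_cons_of_neg hpy]
        exact ih htl

-- a stable sort commutes with filtering
theorem pv_sorted_filter {α κ : Type} [LinearOrder κ] (key : α → κ) (p : α → Bool) (xs : List α) :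
    PySem.List.sorted (xs.filter p) key = (PySem.List.sorted xs key).filter p := by
  induction xs using List.reverseRecOn with
  | nil => rfl
  | append_singleton xs x ih =>
    have hpw : (List.foldl (fun acc x =>
        PySem.List.insertBy (fun a b => decide (key a < key b)) x acc) [] xs).Pairwise
        (fun a b => key a ≤ key b) := by
      have := PySem.List.sorted_pairwise xs key
      rwa [PySem.List.sorted_eq_foldl_insertBy] at this
    simp only [PySem.List.sorted_eq_foldl_insertBy, List.filter_append, List.foldl_append,
      List.foldl_cons, List.foldl_nil] at ih ⊢
    rw [pv_filter_insertBy key p x _ hpw]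
    by_cases hp : p x = true
    · have hfx : List.filter p [x] = [x] := by simp [hp]
      rw [hfx, if_pos hp, ← ih]
      rfl
    · have hfx : List.filter p [x] = ([] : List α) := by simp [hp]
      rw [hfx, if_neg hp, ← ih]
      rfl

-- under Nodup keys, the dict lookup of an entry's own key returns its latency
theorem pv_latLookup_self (l : List (Int × Int × Int))
    (hnd : (l.map (fun t => (t.1, t.2.1))).Nodup) (t : Int × Int × Int) (ht : t ∈ l) :
    pvLatLookup l t.1 t.2.1 = t.2.2 := by
  induction l with
  | nil => cases ht
  | cons u l ih =>
    rw [List.map_cons, List.nodup_cons] at hnd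
    unfold pvLatLookup
    by_cases hu : (u.1 == t.1 && u.2.1 == t.2.1) = true
    · have hkey : (u.1, u.2.1) = (t.1, t.2.1) := by
        simp only [Bool.and_eq_true, beq_iff_eq] at hu
        simp [hu.1, hu.2]
      rcases List.mem_cons.mp ht with rfl | htl
      · have hfind : List.find? (fun u : Int × Int × Int => u.1 == t.1 && u.2.1 == t.2.1) (t :: l)
            = some t := List.find?_cons_of_pos hu
        rw [hfind]
        rfl
      · exact absurd (hkey ▸ List.mem_map_of_mem htl) hnd.1
    · have htl : t ∈ l := by
        rcases List.mem_cons.mp ht with rfl | htl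
        · simp at hu
        · exact htl
      rw [List.find?_cons_of_neg (by simpa using hu)]
      exact ih hnd.2 htl

-- A computes: group in first-appearance order, then sort each group by the dict lookup
theorem pv_A_char (l : List (Int × Int × Int)) :
    get_endpoint_to_sorted_caches l
      = (PySem.Set.update ([] : PySem.Set Int) ((pvF l).map (fun t => t.1))).map
          (fun e => (e, PySem.List.sorted
            (((pvF l).filter (fun t => t.1 == e)).map (fun t => t.2.1))
            (fun c => pvLatLookup l e c))) := by
  simp only [get_endpoint_to_sorted_caches]
  rw [pv_foldl_if_filter (fun t : Int × Int × Int => t.2.1 ≠ pvDCSource)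
    (fun (d : PySem.Dict Int (List Int)) t => d.modify t.1 [] (fun cs => cs ++ [t.2.1]))]
  rw [show List.filter (fun a : Int × Int × Int => decide (a.2.1 ≠ pvDCSource)) l = pvF l from rfl]
  have hnd : ((pvF l).foldl
      (fun (d : PySem.Dict Int (List Int)) t => d.modify t.1 [] (fun cs => cs ++ [t.2.1]))
      PySem.Dict.empty).keys.Nodup := by
    refine PySem.Dict.nodup_keys_foldl_modify_key (pvF l) (fun t => t.1) []
      (fun _ t => fun cs => cs ++ [t.2.1]) PySem.Dict.empty ?_
    simp [PySem.Dict.keys_empty]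
  rw [PySem.Dict.items_eq_map_keys _ hnd []]
  rw [PySem.Dict.keys_foldl_modify_key (pvF l) (fun t => t.1) []
    (fun _ t => fun cs => cs ++ [t.2.1]) PySem.Dict.empty]
  rw [PySem.Dict.keys_empty, List.map_map]
  refine List.map_congr_left (fun e he => ?_)
  simp only [Function.comp]
  rw [pv_getD_group_fold, PySem.Dict.getD_empty, List.nil_append]

-- B computes: seed keys in first-appearance order, sort once globally, distribute
theorem pv_B_char (l : List (Int × Int × Int)) :
    get_endpoint_to_sorted_caches_alt l
      = (PySem.Set.update ([] : PySem.Set Int) ((pvF l).map (fun t => t.1))).map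
          (fun e => (e, ((PySem.List.sorted (pvF l) (fun t => t.2.2)).filter
            (fun t => t.1 == e)).map (fun t => t.2.1))) := by
  simp only [get_endpoint_to_sorted_caches_alt]
  rw [pv_foldl_pair (fun t : Int × Int × Int => t.2.1 ≠ pvDCSource)
    (fun (d : PySem.Dict Int (List Int)) t => d.setdefault t.1 [])
    (fun (es : List (Int × Int × Int)) t => es ++ [t])]
  simp only
  rw [pv_foldl_if_filter (fun t : Int × Int × Int => t.2.1 ≠ pvDCSource)
    (fun (d : PySem.Dict Int (List Int)) t => d.setdefault t.1 []),
    pv_foldl_if_filter (fun t : Int × Int × Int => t.2.1 ≠ pvDCSource)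
    (fun (es : List (Int × Int × Int)) t => es ++ [t]),
    pv_foldl_snoc, List.nil_append]
  rw [show List.filter (fun a : Int × Int × Int => decide (a.2.1 ≠ pvDCSource)) l = pvF l from rfl]
  set d0 := (pvF l).foldl (fun (d : PySem.Dict Int (List Int)) t => d.setdefault t.1 [])
    PySem.Dict.empty with hd0
  set S := PySem.List.sorted (pvF l) (fun t => t.2.2) with hS
  have hd0keys : d0.keys = PySem.Set.update ([] : PySem.Set Int) ((pvF l).map (fun t => t.1)) := by
    rw [hd0, pv_keys_foldl_setdefault, PySem.Dict.keys_empty]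
  have hd0nd : d0.keys.Nodup := by
    refine pv_nodup_keys_foldl_setdefault _ _ ?_
    simp [PySem.Dict.keys_empty]
  have hnd : (S.foldl
      (fun (d : PySem.Dict Int (List Int)) t => d.modify t.1 [] (fun cs => cs ++ [t.2.1]))
      d0).keys.Nodup :=
    PySem.Dict.nodup_keys_foldl_modify_key S (fun t => t.1) []
      (fun _ t => fun cs => cs ++ [t.2.1]) d0 hd0nd
  rw [PySem.Dict.items_eq_map_keys _ hnd []]
  rw [PySem.Dict.keys_foldl_modify_key S (fun t => t.1) []
    (fun _ t => fun cs => cs ++ [t.2.1]) d0]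
  have hsub : PySem.Set.update d0.keys (S.map (fun t => t.1)) = d0.keys := by
    refine pv_set_update_subset _ _ (fun x hx => ?_)
    rcases List.mem_map.mp hx with ⟨t, htS, rfl⟩
    have htF : t ∈ pvF l := (PySem.List.mem_sorted (pvF l) (fun t => t.2.2) false t).mp htS
    rw [hd0keys]
    exact (PySem.Set.mem_ofList ((pvF l).map (fun t => t.1)) t.1).mpr (List.mem_map_of_mem htF)
  rw [hsub, hd0keys]
  refine List.map_congr_left (fun e he => ?_)
  rw [pv_getD_group_fold]
  rw [pv_getD_foldl_setdefault _ _ (fun e' => PySem.Dict.getD_empty e' []) e, List.nil_append]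

-- ===== VERDICT (by name: the statement is the Claim_ definition above) =====
theorem get_endpoint_to_sorted_caches_spec : Claim_equal_get_endpoint_to_sorted_caches := by
  intro l _hdom hpre
  unfold Spec_get_endpoint_to_sorted_caches
  unfold Pre_get_endpoint_to_sorted_caches at hpre
  rw [pv_A_char, pv_B_char]
  refine List.map_congr_left (fun e _he => ?_)
  congr 1
  have hagree : ∀ t ∈ (pvF l).filter (fun t => t.1 == e),
      pvLatLookup l e t.2.1 = t.2.2 := by
    intro t ht
    have h1 : t ∈ pvF l := List.mem_of_mem_filter ht
    have h2 : t.1 = e := by simpa using List.of_mem_filter ht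
    have h3 : t ∈ l := List.mem_of_mem_filter h1
    rw [← h2]
    exact pv_latLookup_self l hpre t h3
  rw [pv_map_sorted (fun t : Int × Int × Int => t.2.1) (fun c => pvLatLookup l e c)
    ((pvF l).filter (fun t => t.1 == e))]
  rw [pv_sorted_congr ((pvF l).filter (fun t => t.1 == e))
    (fun t => pvLatLookup l e t.2.1) (fun t => t.2.2) hagree]
  rw [pv_sorted_filter (fun t : Int × Int × Int => t.2.2) (fun t => t.1 == e) (pvF l)]
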